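-- pv_equiv track=rewrite | github.com/emetzler94/Python-2 | Icon Maker/iconmaker.py | hugify
-- ===== SOURCE A (Python) =====
-- def hugify(sequence):
--     """
--     This function will make the picture bigger.  It just appends however many
--     times you need it to.  The "scale" variable indicates what dimensions each
--     cell will take.  For example, at a scale of 2, each cell becomes a 2x2
--     grid.
--     """
--     thebiggerpicture = []
--     scale = 4
--     count = 0
--     pictureList = []
--     for number in sequence:
--         for counter in range(scale):
--             pictureList.append(number)
--         count += 1
--         if count == 10:
--             pictureLine = "".join(pictureList)
--             for counter in range(scale):
--                 thebiggerpicture.append(pictureLine)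
--             count = 0
--             pictureList = []
--     return thebiggerpicture
-- ===== SOURCE B (Python) =====
-- def hugify(sequence):
--     cells = list(sequence)
--     full_groups = len(cells) // 10
--     result = []
--     for i in range(full_groups):
--         group = cells[i * 10:(i + 1) * 10]
--         line = "".join(c * 4 for c in group)
--         result.extend([line] * 4)
--     return result
-- ===== Notes on version B (the rewrite author's own statement) =====
-- stated objective: simpler
-- what changed: Replaced the streaming counter/flush-every-10 accumulator loop with index arithmetic: compute the number of full groups up front, slice each chunk of 10 out directly, build its line by string repetition and extend the result four times (the trailing partial chunk is never touched).
import Mathlib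
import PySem

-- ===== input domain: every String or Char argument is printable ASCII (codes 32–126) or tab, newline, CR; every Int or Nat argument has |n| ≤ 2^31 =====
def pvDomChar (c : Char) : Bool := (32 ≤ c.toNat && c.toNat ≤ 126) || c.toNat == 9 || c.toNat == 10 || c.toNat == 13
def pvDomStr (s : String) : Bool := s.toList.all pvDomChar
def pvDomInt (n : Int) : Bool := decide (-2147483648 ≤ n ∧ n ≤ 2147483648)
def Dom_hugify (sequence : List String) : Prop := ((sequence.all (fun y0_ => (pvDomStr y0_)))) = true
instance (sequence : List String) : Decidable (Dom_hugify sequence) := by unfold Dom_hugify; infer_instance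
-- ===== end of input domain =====

-- B replaces A's streaming counter/flush-every-10 loop by index arithmetic: len//10 full groups, each sliced out directly (simpler decomposition, same cost).


-- ===== PORT A =====
-- loop body of A's 'for number in sequence' over the state (thebiggerpicture, count, pictureList)
def hugifyStep (st : List String × Int × List String) (number : String) :
    List String × Int × List String :=
  let pictureList := st.2.2 ++ (PySem.List.pyRange 0 4 1).map (fun _ => number)
  let count := st.2.1 + 1
  if count = 10 then
    let pictureLine := PySem.Str.join "" pictureList
    (st.1 ++ (PySem.List.pyRange 0 4 1).map (fun _ => pictureLine), 0, [])
  else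
    (st.1, count, pictureList)

def hugify (sequence : List String) : List String :=
  (sequence.foldl hugifyStep ([], 0, [])).1

-- ===== PORT B =====
-- hand port of Python's s * n (string repetition): exact for a nonnegative count
def pvStrMul (s : String) (n : Nat) : String := PySem.Str.join "" (List.replicate n s)

def hugify_alt (sequence : List String) : List String :=
  let cells := sequence
  let fullGroups := PySem.Int.floordiv (cells.length : Int) 10
  (PySem.List.pyRange 0 fullGroups 1).foldl
    (fun result i =>
      let group := PySem.List.slice cells (some (i * 10)) (some ((i + 1) * 10))
      let line := PySem.Str.join "" (group.map (fun c => pvStrMul c 4))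
      result ++ PySem.List.pyRepeat [line] 4)
    []

-- ===== PRECONDITION & SPEC =====
def Spec_hugify (sequence : List String) (out : List String) : Prop := out = hugify_alt sequence
instance (sequence : List String) (out : List String) : Decidable (Spec_hugify sequence out) := by unfold Spec_hugify; infer_instance

-- ===== CLAIM (what is proved, stated in full; the proofs are below) =====
def Claim_equal_hugify : Prop := ∀ (sequence : List String), Dom_hugify sequence → Spec_hugify sequence (hugify sequence)

-- ===== LEMMAS AND PROOFS =====

theorem pyRange04 : PySem.List.pyRange 0 4 1 = [0,1,2,3] := by decide

-- while count stays below 10 the loop never flushes, so thebiggerpicture is unchanged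
theorem fold_noflush (xs : List String) : ∀ (big pl : List String) (c : Int),
    c + xs.length < 10 → (xs.foldl hugifyStep (big, c, pl)).1 = big := by
  induction xs with
  | nil => intro big pl c _; rfl
  | cons a xs ih =>
    intro big pl c hlt
    simp only [List.length_cons] at hlt
    have hne : ¬ (c + 1 = 10) := by omega
    simp only [List.foldl_cons, hugifyStep, hne, if_false]
    exact ih big _ (c + 1) (by omega)

-- thebiggerpicture only accumulates at the front
theorem fold_accum (xs : List String) : ∀ (big pl : List String) (c : Int),
    (xs.foldl hugifyStep (big, c, pl)).1 = big ++ (xs.foldl hugifyStep ([], c, pl)).1 := by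
  induction xs with
  | nil => intro big pl c; simp
  | cons a xs ih =>
    intro big pl c
    by_cases h : c + 1 = 10
    · simp only [List.foldl_cons, hugifyStep, h, if_true, List.nil_append]
      conv_lhs => rw [ih]
      conv_rhs => rw [ih]
      simp [List.append_assoc]
    · simp only [List.foldl_cons, hugifyStep, h, if_false]
      exact ih big _ (c + 1)

theorem exists_ten {α : Type} (l : List α) (h : 10 ≤ l.length) :
    ∃ a0 a1 a2 a3 a4 a5 a6 a7 a8 a9 t,
      l = a0::a1::a2::a3::a4::a5::a6::a7::a8::a9::t := by
  rcases l with _|⟨a0,_|⟨a1,_|⟨a2,_|⟨a3,_|⟨a4,_|⟨a5,_|⟨a6,_|⟨a7,_|⟨a8,_|⟨a9,t⟩⟩⟩⟩⟩⟩⟩⟩⟩⟩ <;>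
    simp_all

theorem lineEq (a0 a1 a2 a3 a4 a5 a6 a7 a8 a9 : String) :
    PySem.Str.join ""
      [a0,a0,a0,a0,a1,a1,a1,a1,a2,a2,a2,a2,a3,a3,a3,a3,a4,a4,a4,a4,
       a5,a5,a5,a5,a6,a6,a6,a6,a7,a7,a7,a7,a8,a8,a8,a8,a9,a9,a9,a9] =
    PySem.Str.join "" [pvStrMul a0 4, pvStrMul a1 4, pvStrMul a2 4, pvStrMul a3 4,
      pvStrMul a4 4, pvStrMul a5 4, pvStrMul a6 4, pvStrMul a7 4, pvStrMul a8 4, pvStrMul a9 4] := by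
  simp [pvStrMul, PySem.Str.join, PySem.Chars.join, List.intercalate, List.append_assoc]

-- one chunk of ten cells through A's loop: the tenth iteration flushes the four copies of the line
theorem chunkA (a0 a1 a2 a3 a4 a5 a6 a7 a8 a9 : String) (t : List String) :
    hugify (a0::a1::a2::a3::a4::a5::a6::a7::a8::a9::t) =
      List.replicate 4 (PySem.Str.join ""
        [a0,a0,a0,a0,a1,a1,a1,a1,a2,a2,a2,a2,a3,a3,a3,a3,a4,a4,a4,a4,
         a5,a5,a5,a5,a6,a6,a6,a6,a7,a7,a7,a7,a8,a8,a8,a8,a9,a9,a9,a9]) ++ hugify t := by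
  simp [hugify, hugifyStep, pyRange04]
  rw [fold_accum]
  simp

-- B's i-th loop body contribution, as a function of the chunk index
def chunkF (cells : List String) (i : Int) : List String :=
  PySem.List.pyRepeat
    [PySem.Str.join ""
      ((PySem.List.slice cells (some (i * 10)) (some ((i + 1) * 10))).map (fun c => pvStrMul c 4))] 4

-- B is the concatenation of its per-chunk contributions
theorem altB_flat (seq : List String) :
    hugify_alt seq = (List.range (seq.length / 10)).flatMap (fun k : Nat => chunkF seq (k : Int)) := by
  unfold hugify_alt chunkF
  rw [PySem.List.foldl_append_eq_flatMap]
  have hg : PySem.Int.floordiv (seq.length : Int) 10 = ((seq.length / 10 : Nat) : Int) := by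
    rw [PySem.Int.floordiv, Int.fdiv_eq_ediv]
    simp
  rw [hg, PySem.List.pyRange_one, List.flatMap_map]
  norm_num
  have ht : ((seq.length : Int) / 10).toNat = seq.length / 10 := by omega
  rw [ht]

-- slicing chunk k+1 out of a list with ten cells in front is slicing chunk k out of its tail
theorem sliceShift (c0 c1 c2 c3 c4 c5 c6 c7 c8 c9 : String) (t : List String) (k : Nat) :
    PySem.List.slice (c0::c1::c2::c3::c4::c5::c6::c7::c8::c9::t)
        (some (((k : Int) + 1) * 10)) (some ((((k : Int) + 1) + 1) * 10)) =
      PySem.List.slice t (some ((k : Int) * 10)) (some (((k : Int) + 1) * 10)) := by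
  rw [PySem.List.slice_toNat _ (by positivity) (by positivity),
      PySem.List.slice_toNat _ (by positivity) (by positivity)]
  have h1 : (((k : Int) + 1) * 10).toNat = (k * 10) + 10 := by omega
  have h2 : ((((k : Int) + 1) + 1) * 10).toNat = (k * 10 + 10) + 10 := by omega
  have h3 : ((k : Int) * 10).toNat = k * 10 := by omega
  rw [h1, h2, h3]
  have hdrop : (c0::c1::c2::c3::c4::c5::c6::c7::c8::c9::t).drop (k * 10 + 10) = t.drop (k * 10) := by
    have h5 : k * 10 + 10 = 10 + k * 10 := by omega
    rw [h5, ← List.drop_drop]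
    rfl
  rw [hdrop]
  congr 1
  omega

-- one chunk of ten cells through B: the first group is the chunk, the rest shift onto the tail
theorem chunkB (a0 a1 a2 a3 a4 a5 a6 a7 a8 a9 : String) (t : List String) :
    hugify_alt (a0::a1::a2::a3::a4::a5::a6::a7::a8::a9::t) =
      List.replicate 4 (PySem.Str.join "" [pvStrMul a0 4, pvStrMul a1 4, pvStrMul a2 4,
        pvStrMul a3 4, pvStrMul a4 4, pvStrMul a5 4, pvStrMul a6 4, pvStrMul a7 4,
        pvStrMul a8 4, pvStrMul a9 4]) ++ hugify_alt t := by
  rw [altB_flat, altB_flat t]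
  have hlen : (a0::a1::a2::a3::a4::a5::a6::a7::a8::a9::t).length / 10 = t.length / 10 + 1 := by
    simp only [List.length_cons]
    omega
  rw [hlen, List.range_succ_eq_map, List.flatMap_cons, List.flatMap_map]
  have hpt : ∀ k : Nat,
      chunkF (a0::a1::a2::a3::a4::a5::a6::a7::a8::a9::t) ((Nat.succ k : Nat) : Int)
        = chunkF t (k : Int) := by
    intro k
    unfold chunkF
    push_cast
    rw [sliceShift]
  simp only [hpt]
  congr 1

theorem hugify_main (n : Nat) : ∀ (seq : List String), seq.length ≤ n →
    hugify seq = hugify_alt seq := by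
  induction n with
  | zero =>
    intro seq h
    have : seq = [] := List.length_eq_zero_iff.mp (Nat.le_zero.mp h)
    subst this
    rw [altB_flat]
    rfl
  | succ n ih =>
    intro seq h
    by_cases hs : seq.length < 10
    · rw [altB_flat]
      have : seq.length / 10 = 0 := by omega
      rw [this]
      exact fold_noflush seq [] [] 0 (by omega)
    · obtain ⟨a0,a1,a2,a3,a4,a5,a6,a7,a8,a9,t,rfl⟩ := exists_ten seq (by omega)
      rw [chunkA, chunkB, lineEq, ih t (by simp at h; omega)]

-- ===== VERDICT (by name: the statement is the Claim_ definition above) =====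
theorem hugify_spec : Claim_equal_hugify := by
  intro seq _
  unfold Spec_hugify
  exact hugify_main seq.length seq le_rfl
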